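-- pv_equiv track=rewrite | github.com/Kudito98/Codesignal-tasks | graphs-arcade/5-namingRoads/namingRoads.py | solution
-- ===== SOURCE A (Python) =====
-- from collections import defaultdict
--
-- def solution(roads):
--     cities = defaultdict(set)
--     for c1, c2, r in roads:
--         cities[c1].add(r)
--         cities[c2].add(r)
--
--     for s in cities.values():
--         for v in s:
--             if v-1 in s or v+1 in s:
--                 return False
--
--     return True
-- ===== SOURCE B (Python) =====
-- def solution(roads):
--     nums = {}
--     for c1, c2, r in roads:
--         nums.setdefault(c1, []).append(r)
--         nums.setdefault(c2, []).append(r)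
--     for lst in nums.values():
--         lst.sort()
--         for a, b in zip(lst, lst[1:]):
--             if b - a == 1:
--                 return False
--     return True
-- ===== Notes on version B (the rewrite author's own statement) =====
-- stated objective: alternative
-- what changed: Groups road numbers per city into plain lists, then sorts each list and scans adjacent pairs for a difference of exactly 1, instead of building per-city sets and testing v-1/v+1 membership for every element.
import Mathlib
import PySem

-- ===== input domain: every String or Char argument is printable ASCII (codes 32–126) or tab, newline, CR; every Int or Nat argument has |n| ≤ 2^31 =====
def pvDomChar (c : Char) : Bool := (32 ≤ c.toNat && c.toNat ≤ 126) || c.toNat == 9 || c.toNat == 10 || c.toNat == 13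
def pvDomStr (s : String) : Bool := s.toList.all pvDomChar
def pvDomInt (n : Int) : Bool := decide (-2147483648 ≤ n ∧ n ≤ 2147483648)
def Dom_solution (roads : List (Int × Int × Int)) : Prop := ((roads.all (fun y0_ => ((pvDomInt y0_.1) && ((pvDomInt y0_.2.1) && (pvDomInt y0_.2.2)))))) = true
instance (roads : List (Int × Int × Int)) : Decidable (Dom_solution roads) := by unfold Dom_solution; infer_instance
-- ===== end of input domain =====

-- B replaces A's per-city hash sets with ±1 membership tests by per-city lists that are
-- sorted once and scanned over adjacent pairs (diff == 1); alternative algorithm, no speed claim.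

-- ===== PORT A =====
def solution (roads : List (Int × Int × Int)) : Bool :=
  let cities : PySem.Dict Int (PySem.Set Int) :=
    roads.foldl (fun d p =>
      (d.modify p.1 PySem.Set.empty (fun s => PySem.Set.add s p.2.2)).modify
        p.2.1 PySem.Set.empty (fun s => PySem.Set.add s p.2.2)) PySem.Dict.empty
  -- A's inner loop tests v-1/v+1 membership; the early 'return False' is the any
  !(cities.values.any (fun s =>
      s.any (fun v => PySem.Set.contains s (v - 1) || PySem.Set.contains s (v + 1))))

-- ===== PORT B =====
-- the inner 'for a, b in zip(lst, lst[1:])' scan of Source B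
def hasAdj (lst : List Int) : Bool :=
  (lst.zip lst.tail).any (fun p => p.2 - p.1 == 1)

def solution_alt (roads : List (Int × Int × Int)) : Bool :=
  let nums : PySem.Dict Int (List Int) :=
    roads.foldl (fun d p =>
      (d.modify p.1 [] (fun l => l ++ [p.2.2])).modify
        p.2.1 [] (fun l => l ++ [p.2.2])) PySem.Dict.empty
  !(nums.values.any (fun l => hasAdj (PySem.List.sorted l (fun x => x) false)))

-- ===== PRECONDITION & SPEC =====
def Spec_solution (roads : List (Int × Int × Int)) (out : Bool) : Prop := out = solution_alt roads
instance (roads : List (Int × Int × Int)) (out : Bool) : Decidable (Spec_solution roads out) := by unfold Spec_solution; infer_instance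

-- ===== CLAIM (what is proved, stated in full; the proofs are below) =====
def Claim_equal_solution : Prop := ∀ (roads : List (Int × Int × Int)), Dom_solution roads → Spec_solution roads (solution roads)

-- ===== LEMMAS AND PROOFS =====

-- a fold doing two single-key updates per road is the fold of the flattened (city, road) pairs
theorem dictA_flat :
    ∀ (roads : List (Int × Int × Int)) (d : PySem.Dict Int (PySem.Set Int)),
      roads.foldl (fun d p =>
          (d.modify p.1 PySem.Set.empty (fun s => PySem.Set.add s p.2.2)).modify
            p.2.1 PySem.Set.empty (fun s => PySem.Set.add s p.2.2)) d
        = (roads.flatMap (fun p => [(p.1, p.2.2), (p.2.1, p.2.2)])).foldl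
            (fun d q => d.modify q.1 PySem.Set.empty (fun s => PySem.Set.add s q.2)) d := by
  intro roads
  induction roads with
  | nil => intro d; rfl
  | cons p t ih =>
    intro d
    rw [List.foldl_cons, List.flatMap_cons, List.foldl_append]
    simp only [List.foldl_cons, List.foldl_nil]
    exact ih _

theorem dictB_flat :
    ∀ (roads : List (Int × Int × Int)) (d : PySem.Dict Int (List Int)),
      roads.foldl (fun d p =>
          (d.modify p.1 [] (fun l => l ++ [p.2.2])).modify
            p.2.1 [] (fun l => l ++ [p.2.2])) d
        = (roads.flatMap (fun p => [(p.1, p.2.2), (p.2.1, p.2.2)])).foldl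
            (fun d q => d.modify q.1 [] (fun l => l ++ [q.2])) d := by
  intro roads
  induction roads with
  | nil => intro d; rfl
  | cons p t ih =>
    intro d
    rw [List.foldl_cons, List.flatMap_cons, List.foldl_append]
    simp only [List.foldl_cons, List.foldl_nil]
    exact ih _

-- A's per-city set after the build loop, over the flattened pairs
theorem getD_foldl_modify_add (l : List (Int × Int)) (c : Int) :
    ∀ (d : PySem.Dict Int (PySem.Set Int)),
      (l.foldl (fun d q => d.modify q.1 PySem.Set.empty (fun s => PySem.Set.add s q.2)) d).getD
          c PySem.Set.empty
        = PySem.Set.update (d.getD c PySem.Set.empty)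
            ((l.filter (fun q => q.1 == c)).map (·.2)) := by
  induction l with
  | nil => intro d; rfl
  | cons q t ih =>
    intro d
    rw [List.foldl_cons, ih]
    by_cases hc : q.1 = c
    · subst hc
      simp [PySem.Set.update]
    · simp [PySem.Dict.getD_modify, hc, Ne.symm hc]

theorem hasAdj_cons (a b : Int) (t : List Int) :
    hasAdj (a :: b :: t) = ((b - a == 1) || hasAdj (b :: t)) := by
  simp [hasAdj]

-- a ≤-sorted integer list has an adjacent pair differing by exactly 1
-- iff it contains some v together with v + 1
theorem hasAdj_iff : ∀ (m : List Int), m.Pairwise (· ≤ ·) →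
    (hasAdj m = true ↔ ∃ v, v ∈ m ∧ v + 1 ∈ m) := by
  intro m
  induction m with
  | nil => intro _; simp [hasAdj]
  | cons a rest ih =>
    intro hp
    rw [List.pairwise_cons] at hp
    obtain ⟨ha, hp'⟩ := hp
    cases rest with
    | nil =>
      simp only [hasAdj, List.zip_nil_right, List.tail_cons, List.any_nil, List.mem_singleton]
      refine ⟨fun h => by simp at h, ?_⟩
      rintro ⟨v, rfl, h⟩
      omega
    | cons b t =>
      rw [hasAdj_cons]
      have hb := ih hp'
      rw [List.pairwise_cons] at hp'
      obtain ⟨hbmin, _⟩ := hp'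
      constructor
      · intro h
        rcases Bool.or_eq_true _ _ |>.mp h with h1 | h2
        · refine ⟨a, List.mem_cons_self .., ?_⟩
          have : b - a = 1 := by exact_mod_cast of_decide_eq_true h1
          have : a + 1 = b := by omega
          rw [this]; exact List.mem_cons_of_mem _ (List.mem_cons_self ..)
        · obtain ⟨v, hv, hv1⟩ := hb.mp h2
          exact ⟨v, List.mem_cons_of_mem _ hv, List.mem_cons_of_mem _ hv1⟩
      · rintro ⟨v, hv, hv1⟩
        have hav : a ≤ v := by
          rcases List.mem_cons.mp hv with h | h
          · omega
          · exact ha v h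
        have hv1' : v + 1 ∈ b :: t := by
          rcases List.mem_cons.mp hv1 with h | h
          · omega
          · exact h
        rcases List.mem_cons.mp hv with hva | hvr
        · -- v = a : b is squeezed between v and v + 1
          subst hva
          have hbv1 : b ≤ v + 1 := by
            rcases List.mem_cons.mp hv1' with h | h
            · omega
            · exact hbmin _ h
          have hvb : v ≤ b := ha b (List.mem_cons_self ..)
          by_cases hb1 : b = v + 1
          · apply Bool.or_eq_true _ _ |>.mpr; left
            simp only [beq_iff_eq]; omega
          · have hbv : b = v := by omega
            apply Bool.or_eq_true _ _ |>.mpr; right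
            exact hb.mpr ⟨v, by rw [← hbv]; exact List.mem_cons_self .., hv1'⟩
        · apply Bool.or_eq_true _ _ |>.mpr; right
          exact hb.mpr ⟨v, hvr, hv1'⟩

-- core: A's set test on a city's road numbers equals B's sort-and-adjacent-scan on the same numbers
theorem core (l : List Int) :
    (PySem.Set.ofList l).any (fun v =>
        PySem.Set.contains (PySem.Set.ofList l) (v - 1)
          || PySem.Set.contains (PySem.Set.ofList l) (v + 1))
      = hasAdj (PySem.List.sorted l (fun x => x) false) := by
  have hpair : (PySem.List.sorted l (fun x : Int => x) false).Pairwise (· ≤ ·) := by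
    simpa using PySem.List.sorted_pairwise l (fun x : Int => x)
  have hmem : ∀ x : Int, x ∈ PySem.List.sorted l (fun x : Int => x) false ↔ x ∈ l := by
    intro x; exact PySem.List.mem_sorted l (fun x : Int => x) false x
  rw [Bool.eq_iff_iff]
  rw [hasAdj_iff _ hpair]
  rw [List.any_eq_true]
  constructor
  · rintro ⟨v, hv, hcon⟩
    have hvl : v ∈ l := (PySem.Set.mem_ofList _ _).mp hv
    rcases Bool.or_eq_true _ _ |>.mp hcon with h | h
    · have : (v - 1) ∈ l := (PySem.Set.mem_ofList _ _).mp ((PySem.Set.contains_iff _ _).mp h)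
      exact ⟨v - 1, (hmem _).mpr this, by simpa using (hmem v).mpr hvl⟩
    · have : (v + 1) ∈ l := (PySem.Set.mem_ofList _ _).mp ((PySem.Set.contains_iff _ _).mp h)
      exact ⟨v, (hmem _).mpr hvl, (hmem _).mpr this⟩
  · rintro ⟨v, hv, hv1⟩
    refine ⟨v, (PySem.Set.mem_ofList _ _).mpr ((hmem _).mp hv), ?_⟩
    apply Bool.or_eq_true _ _ |>.mpr; right
    exact (PySem.Set.contains_iff _ _).mpr ((PySem.Set.mem_ofList _ _).mpr ((hmem _).mp hv1))

-- ===== VERDICT (by name: the statement is the Claim_ definition above) =====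
theorem solution_spec : Claim_equal_solution := by
  intro roads _
  simp only [Spec_solution, solution, solution_alt]
  set flat := roads.flatMap (fun p => [(p.1, p.2.2), (p.2.1, p.2.2)]) with hflat
  rw [dictA_flat, dictB_flat, ← hflat]
  set dA := flat.foldl (fun d q => d.modify q.1 PySem.Set.empty (fun s => PySem.Set.add s q.2)) PySem.Dict.empty with hdA
  set dB := flat.foldl (fun d q => d.modify q.1 [] (fun l => l ++ [q.2])) PySem.Dict.empty with hdB
  have hkA : dA.keys = PySem.Set.update (PySem.Dict.empty (κ := Int) (ν := PySem.Set Int)).keys (flat.map (·.1)) := by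
    rw [hdA]; exact PySem.Dict.keys_foldl_modify_key flat (·.1) PySem.Set.empty (fun _ q => fun s => PySem.Set.add s q.2) PySem.Dict.empty
  have hkB : dB.keys = PySem.Set.update (PySem.Dict.empty (κ := Int) (ν := List Int)).keys (flat.map (·.1)) := by
    rw [hdB]; exact PySem.Dict.keys_foldl_modify_key flat (·.1) [] (fun _ q => fun l => l ++ [q.2]) PySem.Dict.empty
  have hkeys : dA.keys = dB.keys := by
    rw [hkA, hkB]
  have hndA : dA.keys.Nodup := by
    rw [hdA]
    exact PySem.Dict.nodup_keys_foldl_modify_key flat (·.1) PySem.Set.empty (fun _ q => fun s => PySem.Set.add s q.2) PySem.Dict.empty PySem.Dict.nodup_keys_empty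
  have hndB : dB.keys.Nodup := by
    rw [hkeys] at hndA; exact hndA
  rw [PySem.Dict.values_eq_map_keys dA hndA PySem.Set.empty,
      PySem.Dict.values_eq_map_keys dB hndB [], hkeys, List.any_map, List.any_map]
  refine congrArg (fun b : Bool => !b) (congrArg dB.keys.any ?_)
  funext c
  show (fun s => s.any (fun v => PySem.Set.contains s (v - 1) || PySem.Set.contains s (v + 1))) (dA.getD c PySem.Set.empty)
      = hasAdj (PySem.List.sorted (dB.getD c []) (fun x => x) false)
  have hA : dA.getD c PySem.Set.empty = PySem.Set.ofList ((flat.filter (fun q => q.1 == c)).map (·.2)) := by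
    rw [hdA, getD_foldl_modify_add]
    simp [PySem.Dict.getD_empty, PySem.Set.ofList_eq_foldl, PySem.Set.update, PySem.Set.empty]
  have hB : dB.getD c [] = (flat.filter (fun q => q.1 == c)).map (·.2) := by
    rw [hdB]
    have := PySem.Dict.getD_foldl_modify_append (l := flat) (d := PySem.Dict.empty) (c := c)
    simpa [PySem.Dict.getD_empty] using this
  rw [hA, hB]
  exact core _
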